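-- pv_equiv track=rewrite | github.com/willy2358/LXQEnjoy | Source/server/SocketServer/TestSocket/GameRules/GameRule_Majiang.py | get_forward_bad_cards
-- ===== SOURCE A (Python) =====
-- def get_forward_bad_cards(cards):
--     remainTests = cards[:]
--     remainTests.sort()
--     bads = []
--     while remainTests and len(remainTests) > 0:
--         head = remainTests[0]
--         if (head + 1) in remainTests and (head + 2) in remainTests:
--             remainTests.remove(head)
--             remainTests.remove(head + 1)
--             remainTests.remove(head + 2)
--         else:
--             remainTests.remove(head)
--             bads.append(head)
--
--     return bads
-- ===== SOURCE B (Python) =====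
-- def get_forward_bad_cards(cards):
--     # run-length encode the sorted hand: [value, count] runs with strictly increasing values
--     runs = []
--     for c in sorted(cards):
--         if runs and runs[-1][0] == c:
--             runs[-1][1] += 1
--         else:
--             runs.append([c, 1])
--     bads = []
--     for i in range(len(runs)):
--         v, n = runs[i]
--         if (i + 2 < len(runs) and runs[i + 1][0] == v + 1
--                 and runs[i + 2][0] == v + 2):
--             t = min(n, runs[i + 1][1], runs[i + 2][1])
--             runs[i + 1][1] -= t
--             runs[i + 2][1] -= t
--         else:
--             t = 0
--         bads.extend([v] * (n - t))
--     return bads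
-- ===== Notes on version B (the rewrite author's own statement) =====
-- stated objective: faster
-- what changed: A repeatedly scans and list.remove()s on the sorted list (each `in`/`remove` is O(n)); B run-length-encodes the sorted hand once and makes a single left-to-right pass over the runs, taking min(count, next-run, next-next-run) triples per value in O(1).
import Mathlib
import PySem

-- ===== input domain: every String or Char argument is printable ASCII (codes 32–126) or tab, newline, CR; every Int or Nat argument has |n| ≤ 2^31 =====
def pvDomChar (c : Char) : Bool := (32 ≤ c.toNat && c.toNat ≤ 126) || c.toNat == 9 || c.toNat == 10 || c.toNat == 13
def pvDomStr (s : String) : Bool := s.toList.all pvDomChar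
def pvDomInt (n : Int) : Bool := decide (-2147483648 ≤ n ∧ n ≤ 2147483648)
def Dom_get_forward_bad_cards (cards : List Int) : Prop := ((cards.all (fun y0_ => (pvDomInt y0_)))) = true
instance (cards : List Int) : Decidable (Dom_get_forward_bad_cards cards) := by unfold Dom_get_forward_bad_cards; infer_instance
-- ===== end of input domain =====

-- B replaces A's quadratic remove/in scans with one pass over the run-length
-- encoding of the sorted hand (objective: faster, asymptotic).

-- ===== PORT A =====

-- `remainTests.remove(x)`; at every call site of A the element is present, so `.getD` never fires
def pvRemove (l : List Int) (x : Int) : List Int := (PySem.List.remove? l x).getD l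

theorem pvRemove_length_le (l : List Int) (x : Int) : (pvRemove l x).length ≤ l.length := by
  unfold pvRemove
  induction l with
  | nil => simp [PySem.List.remove?]
  | cons a t ih =>
    by_cases h : a = x
    · subst h; simp [PySem.List.remove?_cons_self]
    · rw [PySem.List.remove?_cons_of_ne _ h]
      cases hr : PySem.List.remove? t x with
      | none => simp
      | some r => simp_all

-- the `while remainTests:` loop of A, with `bads` as accumulator
def aAux (l : List Int) (bads : List Int) : List Int :=
  match h : l with
  | [] => bads
  | head :: tl =>
    if (head + 1) ∈ l ∧ (head + 2) ∈ l then
      aAux (pvRemove (pvRemove (pvRemove l head) (head + 1)) (head + 2)) bads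
    else
      aAux (pvRemove l head) (bads ++ [head])
termination_by l.length
decreasing_by
  · have h1 : pvRemove l head = tl := by
      rw [h]; unfold pvRemove; rw [PySem.List.remove?_cons_self]; rfl
    calc (pvRemove (pvRemove (pvRemove l head) (head + 1)) (head + 2)).length
        ≤ (pvRemove (pvRemove l head) (head + 1)).length := pvRemove_length_le _ _
      _ ≤ (pvRemove l head).length := pvRemove_length_le _ _
      _ = tl.length := by rw [h1]
      _ < (head :: tl).length := by simp
  · have h1 : pvRemove l head = tl := by
      rw [h]; unfold pvRemove; rw [PySem.List.remove?_cons_self]; rfl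
    rw [h1]; simp

def get_forward_bad_cards (cards : List Int) : List Int :=
  aAux (PySem.List.sorted cards (fun x => x) false) []

-- ===== PORT B =====

-- run-length encoding loop of Source B; runs are kept in REVERSED order (head = runs[-1])
def toRunsAux (acc : List (Int × Nat)) (c : Int) : List (Int × Nat) :=
  match acc with
  | (v, n) :: rest => if v = c then (v, n + 1) :: rest else (c, 1) :: (v, n) :: rest
  | [] => [(c, 1)]

def toRuns (l : List Int) : List (Int × Nat) :=
  (l.foldl toRunsAux []).reverse

-- the `for i in range(len(runs))` loop of Source B: look at the next two runs only
def bAux (l : List (Int × Nat)) : List Int :=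
  match l with
  | [] => []
  | (v, n) :: rs =>
    match rs with
    | (w1, c1) :: (w2, c2) :: rest =>
      if w1 = v + 1 ∧ w2 = v + 2 then
        let t := min n (min c1 c2)
        List.replicate (n - t) v ++ bAux ((w1, c1 - t) :: (w2, c2 - t) :: rest)
      else
        List.replicate n v ++ bAux ((w1, c1) :: (w2, c2) :: rest)
    | other => List.replicate n v ++ bAux other
termination_by l.length
decreasing_by all_goals simp_all

def get_forward_bad_cards_alt (cards : List Int) : List Int :=
  bAux (toRuns (PySem.List.sorted cards (fun x => x) false))

-- ===== PRECONDITION & SPEC =====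
def Spec_get_forward_bad_cards (cards : List Int) (out : List Int) : Prop := out = get_forward_bad_cards_alt cards
instance (cards : List Int) (out : List Int) : Decidable (Spec_get_forward_bad_cards cards out) := by unfold Spec_get_forward_bad_cards; infer_instance

-- ===== CLAIM (what is proved, stated in full; the proofs are below) =====
def Claim_equal_get_forward_bad_cards : Prop := ∀ (cards : List Int), Dom_get_forward_bad_cards cards → Spec_get_forward_bad_cards cards (get_forward_bad_cards cards)

-- ===== LEMMAS AND PROOFS =====

def fromRuns (rs : List (Int × Nat)) : List Int :=
  rs.flatMap (fun p => List.replicate p.2 p.1)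

theorem fromRuns_cons (v : Int) (n : Nat) (rs : List (Int × Nat)) :
    fromRuns ((v, n) :: rs) = List.replicate n v ++ fromRuns rs := rfl

theorem mem_fromRuns (x : Int) (rs : List (Int × Nat)) :
    x ∈ fromRuns rs ↔ ∃ p ∈ rs, p.1 = x ∧ 0 < p.2 := by
  simp only [fromRuns, List.mem_flatMap, List.mem_replicate]
  constructor
  · rintro ⟨p, hp, hne, hx⟩; exact ⟨p, hp, hx.symm, Nat.pos_of_ne_zero hne⟩
  · rintro ⟨p, hp, hx, hc⟩; exact ⟨p, hp, Nat.pos_iff_ne_zero.mp hc, hx.symm⟩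

theorem remove?_append_of_not_mem (x : Int) (p m : List Int) (h : x ∉ p) :
    PySem.List.remove? (p ++ m) x = (PySem.List.remove? m x).map (p ++ ·) := by
  induction p with
  | nil => simp
  | cons a t ih =>
    have ha : a ≠ x := fun he => h (he ▸ List.mem_cons_self)
    have ht : x ∉ t := fun hm => h (List.mem_cons_of_mem _ hm)
    rw [List.cons_append, PySem.List.remove?_cons_of_ne _ ha, ih ht]
    cases PySem.List.remove? m x <;> simp

theorem pvRemove_prefix (x : Int) (p m : List Int) (c : Nat) (h : x ∉ p) :
    pvRemove (p ++ (List.replicate (c + 1) x ++ m)) x = p ++ (List.replicate c x ++ m) := by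
  unfold pvRemove
  rw [remove?_append_of_not_mem _ _ _ h, List.replicate_succ, List.cons_append,
    PySem.List.remove?_cons_self]
  rfl

theorem not_mem_replicate (x v : Int) (n : Nat) (h : x ≠ v) : x ∉ List.replicate n v := by
  simp [List.mem_replicate, h]

theorem bAux_zero (v : Int) (rs : List (Int × Nat)) : bAux ((v, 0) :: rs) = bAux rs := by
  rw [bAux.eq_def]
  match rs with
  | [] => rfl
  | [(w1, c1)] => rfl
  | (w1, c1) :: (w2, c2) :: rest =>
    by_cases hw : w1 = v + 1 ∧ w2 = v + 2
    · simp [hw]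
    · simp [hw]

theorem pairwise_fst {v w1 w2 : Int} {a b c a' b' c' : Nat} {rest : List (Int × Nat)}
    (h : ((v, a) :: (w1, b) :: (w2, c) :: rest).Pairwise (fun p q => p.1 < q.1)) :
    ((v, a') :: (w1, b') :: (w2, c') :: rest).Pairwise (fun p q => p.1 < q.1) := by
  simp only [List.pairwise_cons, List.mem_cons] at h ⊢
  obtain ⟨h1, h2, h3, h4⟩ := h
  refine ⟨?_, ?_, h3, h4⟩
  · rintro p (rfl | rfl | hm)
    · exact h1 (w1, b) (by simp)
    · exact h1 (w2, c) (by simp)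
    · exact h1 p (by simp [hm])
  · rintro p (rfl | hm)
    · exact h2 (w2, c) (by simp)
    · exact h2 p (by simp [hm])

theorem aAux_cons (x : Int) (t bads : List Int) :
    aAux (x :: t) bads =
      if (x + 1) ∈ (x :: t) ∧ (x + 2) ∈ (x :: t) then
        aAux (pvRemove (pvRemove t (x + 1)) (x + 2)) bads
      else aAux t (bads ++ [x]) := by
  have hrm : pvRemove (x :: t) x = t := by
    unfold pvRemove; rw [PySem.List.remove?_cons_self]; rfl
  rw [aAux.eq_def]
  simp only [hrm]

theorem bAux_single (v : Int) (m : Nat) : bAux [(v, m)] = List.replicate m v := by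
  rw [bAux.eq_def]
  simp [bAux]

theorem bAux_pair (v w1 : Int) (m c1 : Nat) :
    bAux ((v, m) :: [(w1, c1)]) = List.replicate m v ++ bAux [(w1, c1)] := by
  rw [bAux.eq_def]

theorem bAux_triple (v : Int) (m c1 c2 : Nat) (rest : List (Int × Nat)) :
    bAux ((v, m) :: (v + 1, c1) :: (v + 2, c2) :: rest) =
      List.replicate (m - min m (min c1 c2)) v ++
        bAux ((v + 1, c1 - min m (min c1 c2)) :: (v + 2, c2 - min m (min c1 c2)) :: rest) := by
  rw [bAux.eq_def]
  simp

theorem bAux_cons_else (v w1 w2 : Int) (m c1 c2 : Nat) (rest : List (Int × Nat))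
    (hne : ¬(w1 = v + 1 ∧ w2 = v + 2)) :
    bAux ((v, m) :: (w1, c1) :: (w2, c2) :: rest) =
      List.replicate m v ++ bAux ((w1, c1) :: (w2, c2) :: rest) := by
  rw [bAux.eq_def]
  simp [hne]

theorem main_lemma : ∀ (N : Nat) (rs : List (Int × Nat)),
    (fromRuns rs).length + rs.length ≤ N →
    rs.Pairwise (fun p q => p.1 < q.1) →
    ∀ acc, aAux (fromRuns rs) acc = acc ++ bAux rs := by
  intro N
  induction N with
  | zero =>
    intro rs h _ acc
    have : rs = [] := by cases rs <;> simp_all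
    subst this
    simp [fromRuns, aAux, bAux]
  | succ N ih =>
    intro rs h hp acc
    match rs with
    | [] => simp [fromRuns, aAux, bAux]
    | (v, 0) :: rs' =>
      rw [fromRuns_cons, bAux_zero]
      simp only [List.replicate, List.nil_append]
      refine ih rs' ?_ (List.Pairwise.of_cons hp) acc
      simp only [fromRuns_cons, List.length_append, List.length_replicate, List.length_cons] at h
      omega
    | (v, n + 1) :: rs' =>
      have hl : fromRuns ((v, n + 1) :: rs') = v :: (List.replicate n v ++ fromRuns rs') := by
        rw [fromRuns_cons, List.replicate_succ, List.cons_append]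
      have hgt : ∀ p ∈ rs', v < p.1 := (List.pairwise_cons.mp hp).1
      have hp' : rs'.Pairwise (fun p q => p.1 < q.1) := hp.of_cons
      have hmemT : ∀ y : Int, y ∈ v :: (List.replicate n v ++ fromRuns rs') →
          y = v ∨ ∃ p ∈ rs', p.1 = y ∧ 0 < p.2 := by
        intro y hy
        rcases List.mem_cons.mp hy with hh | hh
        · exact Or.inl hh
        · rcases List.mem_append.mp hh with hh | hh
          · exact Or.inl (List.mem_replicate.mp hh).2
          · exact Or.inr ((mem_fromRuns _ _).mp hh)
      rw [hl, aAux_cons]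
      rcases rs' with _ | ⟨⟨w1, c1⟩, _ | ⟨⟨w2, c2⟩, rest⟩⟩
      ·
        have hcnot : ¬(v + 1 ∈ v :: (List.replicate n v ++ fromRuns ([] : List (Int × Nat))) ∧
            v + 2 ∈ v :: (List.replicate n v ++ fromRuns ([] : List (Int × Nat)))) := by
          rintro ⟨h1, _⟩
          rcases hmemT _ h1 with hh | ⟨p, hm, _, _⟩
          · omega
          · simp at hm
        rw [if_neg hcnot]
        have hTe : List.replicate n v ++ fromRuns ([] : List (Int × Nat)) = fromRuns [(v, n)] := by
          simp [fromRuns]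
        have hmeas : (fromRuns [(v, n)]).length + [(v, n)].length ≤ N := by
          simp [fromRuns] at h ⊢
          omega
        rw [hTe, ih [(v, n)] hmeas (by simp) (acc ++ [v]), bAux_single, bAux_single]
        simp [List.replicate_succ]
      ·
        have hvw1 : v < w1 := hgt (w1, c1) List.mem_cons_self
        have hcnot : ¬(v + 1 ∈ v :: (List.replicate n v ++ fromRuns [(w1, c1)]) ∧
            v + 2 ∈ v :: (List.replicate n v ++ fromRuns [(w1, c1)])) := by
          rintro ⟨h1, h2⟩
          rcases hmemT _ h1 with hh | ⟨p, hm, he, _⟩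
          · omega
          · simp only [List.mem_cons, List.not_mem_nil, or_false] at hm
            rcases hmemT _ h2 with hh2 | ⟨q, hm2, he2, _⟩
            · omega
            · simp only [List.mem_cons, List.not_mem_nil, or_false] at hm2
              subst hm; subst hm2; omega
        rw [if_neg hcnot]
        have hTe : List.replicate n v ++ fromRuns [(w1, c1)] = fromRuns ((v, n) :: [(w1, c1)]) := by
          simp [fromRuns]
        have hmeas : (fromRuns ((v, n) :: [(w1, c1)])).length + ((v, n) :: [(w1, c1)]).length ≤ N := by
          simp [fromRuns] at h ⊢
          omega
        have hpw : ((v, n) :: [(w1, c1)]).Pairwise (fun p q => p.1 < q.1) :=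
          List.pairwise_cons.mpr ⟨(List.pairwise_cons.mp hp).1, hp'⟩
        rw [hTe, ih ((v, n) :: [(w1, c1)]) hmeas hpw (acc ++ [v]), bAux_pair, bAux_pair]
        simp [List.replicate_succ]
      ·
        have hvw1 : v < w1 := hgt (w1, c1) List.mem_cons_self
        have hw12 : w1 < w2 := (List.pairwise_cons.mp hp').1 (w2, c2) List.mem_cons_self
        have hw2r : ∀ p ∈ rest, w2 < p.1 := (List.pairwise_cons.mp hp'.of_cons).1
        by_cases htrip : w1 = v + 1 ∧ w2 = v + 2 ∧ 0 < c1 ∧ 0 < c2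
        · obtain ⟨he1, he2, hc1, hc2⟩ := htrip
          subst he1; subst he2
          obtain ⟨c1', rfl⟩ : ∃ k, c1 = k + 1 := ⟨c1 - 1, by omega⟩
          obtain ⟨c2', rfl⟩ : ∃ k, c2 = k + 1 := ⟨c2 - 1, by omega⟩
          have hcpos : v + 1 ∈ v :: (List.replicate n v ++
                fromRuns ((v + 1, c1' + 1) :: (v + 2, c2' + 1) :: rest)) ∧
              v + 2 ∈ v :: (List.replicate n v ++
                fromRuns ((v + 1, c1' + 1) :: (v + 2, c2' + 1) :: rest)) := by
            constructor
            · exact List.mem_cons_of_mem _ (List.mem_append_right _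
                ((mem_fromRuns _ _).mpr ⟨(v + 1, c1' + 1), List.mem_cons_self, rfl, by omega⟩))
            · exact List.mem_cons_of_mem _ (List.mem_append_right _
                ((mem_fromRuns _ _).mpr ⟨(v + 2, c2' + 1),
                  List.mem_cons_of_mem _ List.mem_cons_self, rfl, by omega⟩))
          rw [if_pos hcpos]
          have key : pvRemove (pvRemove (List.replicate n v ++
                fromRuns ((v + 1, c1' + 1) :: (v + 2, c2' + 1) :: rest)) (v + 1)) (v + 2) =
              fromRuns ((v, n) :: (v + 1, c1') :: (v + 2, c2') :: rest) := by
            have e1 : List.replicate n v ++ fromRuns ((v + 1, c1' + 1) :: (v + 2, c2' + 1) :: rest)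
                = List.replicate n v ++ (List.replicate (c1' + 1) (v + 1) ++
                    fromRuns ((v + 2, c2' + 1) :: rest)) := by
              simp [fromRuns]
            rw [e1, pvRemove_prefix _ _ _ _ (not_mem_replicate _ _ _ (by omega))]
            have e2 : List.replicate n v ++ (List.replicate c1' (v + 1) ++
                  fromRuns ((v + 2, c2' + 1) :: rest))
                = (List.replicate n v ++ List.replicate c1' (v + 1)) ++
                    (List.replicate (c2' + 1) (v + 2) ++ fromRuns rest) := by
              simp [fromRuns]
            have hnm : (v + 2) ∉ List.replicate n v ++ List.replicate c1' (v + 1) := by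
              intro hm
              rcases List.mem_append.mp hm with hm | hm
              · exact absurd (List.mem_replicate.mp hm).2 (by omega)
              · exact absurd (List.mem_replicate.mp hm).2 (by omega)
            rw [e2, pvRemove_prefix _ _ _ _ hnm]
            simp [fromRuns_cons, List.append_assoc]
          have hmeas : (fromRuns ((v, n) :: (v + 1, c1') :: (v + 2, c2') :: rest)).length +
              ((v, n) :: (v + 1, c1') :: (v + 2, c2') :: rest).length ≤ N := by
            simp [fromRuns] at h ⊢
            omega
          rw [key, ih ((v, n) :: (v + 1, c1') :: (v + 2, c2') :: rest) hmeas (pairwise_fst hp) acc]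
          rw [bAux_triple, bAux_triple]
          have e1 : n + 1 - min (n + 1) (min (c1' + 1) (c2' + 1)) = n - min n (min c1' c2') := by
            omega
          have e2 : c1' + 1 - min (n + 1) (min (c1' + 1) (c2' + 1)) = c1' - min n (min c1' c2') := by
            omega
          have e3 : c2' + 1 - min (n + 1) (min (c1' + 1) (c2' + 1)) = c2' - min n (min c1' c2') := by
            omega
          rw [e1, e2, e3]
        · have hcnot : ¬(v + 1 ∈ v :: (List.replicate n v ++
                fromRuns ((w1, c1) :: (w2, c2) :: rest)) ∧
              v + 2 ∈ v :: (List.replicate n v ++ fromRuns ((w1, c1) :: (w2, c2) :: rest))) := by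
            rintro ⟨h1, h2⟩
            rcases hmemT _ h1 with hh | ⟨p, hm, he, hcp⟩
            · omega
            · rcases List.mem_cons.mp hm with rfl | hm
              · rcases hmemT _ h2 with hh2 | ⟨q, hm2, he2, hcq⟩
                · omega
                · rcases List.mem_cons.mp hm2 with rfl | hm2
                  · omega
                  · rcases List.mem_cons.mp hm2 with rfl | hm2
                    · exact htrip ⟨he, by omega⟩
                    · have := hw2r _ hm2; omega
              · rcases List.mem_cons.mp hm with rfl | hm
                · omega
                · have := hw2r _ hm; omega
          rw [if_neg hcnot]
          have hTe : List.replicate n v ++ fromRuns ((w1, c1) :: (w2, c2) :: rest)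
              = fromRuns ((v, n) :: (w1, c1) :: (w2, c2) :: rest) := by
            simp [fromRuns]
          have hmeas : (fromRuns ((v, n) :: (w1, c1) :: (w2, c2) :: rest)).length +
              ((v, n) :: (w1, c1) :: (w2, c2) :: rest).length ≤ N := by
            simp [fromRuns] at h ⊢
            omega
          rw [hTe, ih ((v, n) :: (w1, c1) :: (w2, c2) :: rest) hmeas (pairwise_fst hp) (acc ++ [v])]
          by_cases hsh : w1 = v + 1 ∧ w2 = v + 2
          · obtain ⟨rfl, rfl⟩ := hsh
            have hc0 : min c1 c2 = 0 := by omega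
            rw [bAux_triple, bAux_triple]
            have e1 : min (n + 1) (min c1 c2) = 0 := by omega
            have e2 : min n (min c1 c2) = 0 := by omega
            rw [e1, e2]
            simp [List.replicate_succ]
          · rw [bAux_cons_else _ _ _ _ _ _ _ hsh, bAux_cons_else _ _ _ _ _ _ _ hsh]
            simp [List.replicate_succ]

theorem fold_inv : ∀ (l : List Int) (v : Int) (n : Nat) (acc : List (Int × Nat)),
    l.Pairwise (· ≤ ·) →
    (∀ x ∈ l, v ≤ x) →
    ((v, n) :: acc).Pairwise (fun p q => q.1 < p.1) →
    (l.foldl toRunsAux ((v, n) :: acc)).Pairwise (fun p q => q.1 < p.1) ∧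
      fromRuns (l.foldl toRunsAux ((v, n) :: acc)).reverse = fromRuns ((v, n) :: acc).reverse ++ l := by
  intro l
  induction l with
  | nil => intro v n acc _ _ hacc; exact ⟨hacc, by simp⟩
  | cons c l' ih =>
    intro v n acc hs hlo hacc
    have hvc : v ≤ c := hlo c List.mem_cons_self
    have hs' : l'.Pairwise (· ≤ ·) := hs.of_cons
    have hcl : ∀ x ∈ l', c ≤ x := by
      intro x hx; exact (List.pairwise_cons.mp hs).1 x hx
    rw [List.foldl_cons]
    by_cases hvceq : v = c
    · subst hvceq
      have hstep : toRunsAux ((v, n) :: acc) v = (v, n + 1) :: acc := by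
        simp [toRunsAux]
      rw [hstep]
      have hacc' : ((v, n + 1) :: acc).Pairwise (fun p q => q.1 < p.1) := by
        simp only [List.pairwise_cons] at hacc ⊢
        exact ⟨hacc.1, hacc.2⟩
      obtain ⟨hpw, hfr⟩ := ih v (n + 1) acc hs' hcl hacc'
      refine ⟨hpw, ?_⟩
      rw [hfr]
      simp [fromRuns, List.replicate_succ']
    · have hvlt : v < c := lt_of_le_of_ne hvc hvceq
      have hstep : toRunsAux ((v, n) :: acc) c = (c, 1) :: (v, n) :: acc := by
        simp [toRunsAux, hvceq]
      rw [hstep]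
      have hacc' : ((c, 1) :: (v, n) :: acc).Pairwise (fun p q => q.1 < p.1) := by
        simp only [List.pairwise_cons, List.mem_cons] at hacc ⊢
        refine ⟨?_, hacc⟩
        rintro p (rfl | hm)
        · exact hvlt
        · exact lt_trans (hacc.1 p hm) hvlt
      obtain ⟨hpw, hfr⟩ := ih c 1 ((v, n) :: acc) hs' hcl hacc'
      refine ⟨hpw, ?_⟩
      rw [hfr]
      simp [fromRuns]

theorem toRuns_spec (l : List Int) (hs : l.Pairwise (· ≤ ·)) :
    (toRuns l).Pairwise (fun p q => p.1 < q.1) ∧ fromRuns (toRuns l) = l := by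
  match l with
  | [] => exact ⟨by simp [toRuns], by simp [toRuns, fromRuns]⟩
  | c :: l' =>
    have hstep : toRunsAux [] c = [(c, 1)] := rfl
    have h1 : ∀ x ∈ l', c ≤ x := fun x hx => (List.pairwise_cons.mp hs).1 x hx
    obtain ⟨hpw, hfr⟩ := fold_inv l' c 1 [] hs.of_cons h1 (by simp)
    constructor
    · unfold toRuns
      rw [List.foldl_cons, hstep]
      rw [List.pairwise_reverse]
      exact hpw
    · unfold toRuns
      rw [List.foldl_cons, hstep, hfr]
      simp [fromRuns]

-- ===== VERDICT (by name: the statement is the Claim_ definition above) =====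
theorem get_forward_bad_cards_spec : Claim_equal_get_forward_bad_cards := by
  intro cards _
  unfold Spec_get_forward_bad_cards get_forward_bad_cards get_forward_bad_cards_alt
  have hs : (PySem.List.sorted cards (fun x => x) false).Pairwise (· ≤ ·) := by
    have := PySem.List.sorted_pairwise (xs := cards) (key := fun x => x)
    simpa using this
  obtain ⟨hpw, hfr⟩ := toRuns_spec _ hs
  have := main_lemma ((fromRuns (toRuns (PySem.List.sorted cards (fun x => x) false))).length
      + (toRuns (PySem.List.sorted cards (fun x => x) false)).length) _ le_rfl hpw []
  rw [hfr] at this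
  simpa using this
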